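-- pv_equiv track=rewrite | github.com/oyjs1989/code-review-kit | languages/go/tools/classify-diff.py | _parse_diff_files
-- ===== SOURCE A (Python) =====
-- def _parse_diff_files(diff_text: str) -> dict[str, list[str]]:
--     """Parse diff into {filepath: [diff_lines]} mapping."""
--     files: dict[str, list[str]] = {}
--     current_file = None
--     for line in diff_text.splitlines():
--         if line.startswith('diff --git'):
--             current_file = None
--         elif line.startswith('+++ b/'):
--             current_file = line[6:]
--             if current_file not in files:
--                 files[current_file] = []
--         elif current_file is not None:
--             files[current_file].append(line)
--     return files
-- ===== SOURCE B (Python) =====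
-- def _parse_diff_files(diff_text: str) -> dict[str, list[str]]:
--     """Parse diff into {filepath: [diff_lines]} mapping.
--
--     Segment-based: find each '+++ b/' header, grab its whole body (the lines
--     up to the next marker of either kind) in one go, and merge it into the
--     mapping; lines outside any section are never touched individually.
--     """
--     files: dict[str, list[str]] = {}
--     rest = diff_text.splitlines()
--     while rest:
--         head, rest = rest[0], rest[1:]
--         if head.startswith('+++ b/'):
--             body = []
--             for ln in rest:
--                 if ln.startswith('+++ b/') or ln.startswith('diff --git'):
--                     break
--                 body.append(ln)
--             files.setdefault(head[6:], []).extend(body)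
--             rest = rest[len(body):]
--     return files
-- ===== Notes on version B (the rewrite author's own statement) =====
-- stated objective: alternative
-- what changed: Replaced A's line-by-line state machine carrying a current_file flag with a segment recursion: find each file-header marker line, collect its whole body (lines up to the next marker of either kind) in one inner pass, merge it into the mapping with setdefault+extend, and continue after the body.
import Mathlib
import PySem

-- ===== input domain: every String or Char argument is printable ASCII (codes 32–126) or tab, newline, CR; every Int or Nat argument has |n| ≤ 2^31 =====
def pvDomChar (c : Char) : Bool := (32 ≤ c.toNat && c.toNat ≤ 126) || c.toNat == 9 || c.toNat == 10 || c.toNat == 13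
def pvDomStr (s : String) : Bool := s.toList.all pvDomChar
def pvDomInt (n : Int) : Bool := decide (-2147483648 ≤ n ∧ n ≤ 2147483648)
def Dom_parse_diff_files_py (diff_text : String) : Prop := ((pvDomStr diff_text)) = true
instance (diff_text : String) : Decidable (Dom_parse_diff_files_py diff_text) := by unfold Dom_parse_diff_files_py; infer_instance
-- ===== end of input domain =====

-- B replaces A's line-by-line state machine (current_file flag) by a segment recursion:
-- find each file-header marker, grab its whole body in one inner pass, merge it, and
-- recurse after the body (objective: alternative decomposition, same cost).

-- ===== PORT A =====
-- one iteration of A's for-loop; state = (files dict, current_file)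
def pdfAStep (st : PySem.Dict String (List String) × Option String) (line : String) :
    PySem.Dict String (List String) × Option String :=
  if PySem.Str.startswith line "diff --git" then (st.1, none)
  else if PySem.Str.startswith line "+++ b/" then
    let cf := PySem.Str.slice line (some 6) none
    (if st.1.contains cf then st.1 else st.1.insert cf [], some cf)
  else
    match st.2 with
    | some cf => (st.1.modify cf [] (· ++ [line]), some cf)  -- files[cf].append(line); cf always present
    | none => st

def parse_diff_files_py (diff_text : String) : List (String × List String) :=
  (((PySem.Str.splitlines diff_text).foldl pdfAStep (PySem.Dict.empty, none)).1).items

-- ===== PORT B =====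
-- the inner for-ln-in-rest loop of Source B: collect lines up to (not incl.) the next marker
def pdfBody : List String → List String
  | [] => []
  | ln :: t =>
    if PySem.Str.startswith ln "+++ b/" || PySem.Str.startswith ln "diff --git" then []
    else ln :: pdfBody t

-- the while-rest loop of Source B; files.setdefault(p, []).extend(body) is d[p] = d.get(p, []) + body,
-- i.e. PySem.Dict.modify p [] (· ++ body)
def pdfGo (files : PySem.Dict String (List String)) :
    List String → PySem.Dict String (List String)
  | [] => files
  | head :: rest =>
    if PySem.Str.startswith head "+++ b/" then
      let body := pdfBody rest
      pdfGo (files.modify (PySem.Str.slice head (some 6) none) [] (· ++ body))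
        (rest.drop body.length)
    else pdfGo files rest
  termination_by l => l.length
  decreasing_by
    · simp only [List.length_drop, List.length_cons]; omega
    · simp

def parse_diff_files_py_alt (diff_text : String) : List (String × List String) :=
  (pdfGo PySem.Dict.empty (PySem.Str.splitlines diff_text)).items

-- ===== PRECONDITION & SPEC =====
def Spec_parse_diff_files_py (diff_text : String) (out : List (String × List String)) : Prop := out = parse_diff_files_py_alt diff_text
instance (diff_text : String) (out : List (String × List String)) : Decidable (Spec_parse_diff_files_py diff_text out) := by unfold Spec_parse_diff_files_py; infer_instance

-- ===== CLAIM (what is proved, stated in full; the proofs are below) =====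
def Claim_equal_parse_diff_files_py : Prop := ∀ (diff_text : String), Dom_parse_diff_files_py diff_text → Spec_parse_diff_files_py diff_text (parse_diff_files_py diff_text)

-- ===== LEMMAS AND PROOFS =====

-- equation lemmas for pdfGo
theorem pdfGo_nil (files : PySem.Dict String (List String)) : pdfGo files [] = files := by
  simp [pdfGo]

theorem pdfGo_cons_pos (files : PySem.Dict String (List String)) (h : String) (t : List String)
    (hh : PySem.Str.startswith h "+++ b/" = true) :
    pdfGo files (h :: t) =
      pdfGo (files.modify (PySem.Str.slice h (some 6) none) [] (· ++ pdfBody t))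
        (t.drop (pdfBody t).length) := by
  rw [pdfGo, hh]; simp

theorem pdfGo_cons_neg (files : PySem.Dict String (List String)) (h : String) (t : List String)
    (hh : PySem.Str.startswith h "+++ b/" = false) :
    pdfGo files (h :: t) = pdfGo files t := by
  rw [pdfGo, hh]; simp

-- a line cannot start with both markers
theorem pdf_not_both (h : String) (hd : PySem.Str.startswith h "diff --git" = true) :
    PySem.Str.startswith h "+++ b/" = false := by
  by_contra hp
  rw [Bool.not_eq_false] at hp
  have h1 : "diff --git".toList <+: h.toList := by
    simpa [PySem.Str.startswith, PySem.Chars.startswith_iff] using hd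
  have h2 : "+++ b/".toList <+: h.toList := by
    simpa [PySem.Str.startswith, PySem.Chars.startswith_iff] using hp
  obtain ⟨t1, e1⟩ := h1
  obtain ⟨t2, e2⟩ := h2
  rw [← e1] at e2
  simp at e2

theorem getD_of_not_contains {κ ν : Type} [BEq κ] [LawfulBEq κ] (d : PySem.Dict κ ν) (k : κ)
    (dflt : ν) (hc : d.contains k = false) : d.getD k dflt = dflt := by
  have : d.get? k = none := (PySem.Dict.get?_eq_none_iff_contains d k).mpr hc
  simp [PySem.Dict.getD, this]

theorem insert_getD_of_contains {κ ν : Type} [BEq κ] [LawfulBEq κ]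
    (d : PySem.Dict κ ν) (k : κ) (dflt : ν)
    (hc : d.contains k = true) (hn : d.keys.Nodup) :
    d.insert k (d.getD k dflt) = d := by
  obtain ⟨p, hpmem, hpk⟩ : ∃ p ∈ d.items, p.1 = k := by
    simpa [PySem.Dict.contains, List.any_eq_true] using hc
  obtain ⟨p1, p2⟩ := p
  simp only at hpk
  subst hpk
  have hget : d.get? p1 = some p2 := PySem.Dict.get?_of_mem_items d hpmem hn
  have hgetD : d.getD p1 dflt = p2 := by simp [PySem.Dict.getD, hget]
  apply PySem.Dict.ext
  rw [PySem.Dict.items_insert_of_contains d _ hc]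
  have hfix : ∀ q ∈ d.items,
      (if (q.1 == p1) = true then (p1, d.getD p1 dflt) else q) = q := by
    intro q hq
    obtain ⟨q1, q2⟩ := q
    by_cases hqk : q1 = p1
    · subst hqk
      have hq2 : d.get? q1 = some q2 := PySem.Dict.get?_of_mem_items d hq hn
      have hv : p2 = q2 := by rw [hget] at hq2; exact Option.some.inj hq2
      simp [hgetD, hv]
    · simp [hqk]
  exact (List.map_congr_left hfix).trans (List.map_id _)

-- appending the empty body at a present key is the identity
theorem modify_append_nil_of_contains {κ : Type} [BEq κ] [LawfulBEq κ]
    (d : PySem.Dict κ (List String)) (k : κ)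
    (hc : d.contains k = true) (hn : d.keys.Nodup) :
    d.modify k [] (· ++ ([] : List String)) = d := by
  rw [PySem.Dict.modify]
  simp only [List.append_nil]
  exact insert_getD_of_contains d k [] hc hn

-- collapsing two appends at the same key
theorem modify_modify_append {κ : Type} [BEq κ] [LawfulBEq κ]
    (d : PySem.Dict κ (List String)) (k : κ) (a b : List String) :
    (d.modify k [] (· ++ a)).modify k [] (· ++ b) = d.modify k [] (· ++ (a ++ b)) := by
  simp [PySem.Dict.modify, PySem.Dict.getD_insert_self, PySem.Dict.insert_insert_self,
    List.append_assoc]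

-- modify preserves contains / Nodup keys (modify is an insert)
theorem contains_modify_self {κ ν : Type} [BEq κ] [LawfulBEq κ]
    (d : PySem.Dict κ ν) (k : κ) (dflt : ν) (f : ν → ν) :
    (d.modify k dflt f).contains k = true := by
  simp [PySem.Dict.modify, PySem.Dict.contains_insert_self]

theorem nodup_keys_modify {κ ν : Type} [BEq κ] [LawfulBEq κ]
    (d : PySem.Dict κ ν) (k : κ) (dflt : ν) (f : ν → ν) (hn : d.keys.Nodup) :
    (d.modify k dflt f).keys.Nodup := PySem.Dict.nodup_keys_insert d _ _ hn

-- the main invariant: A's fold from any state equals B's segment recursion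
theorem pdf_main (lines : List String) :
    ∀ (files : PySem.Dict String (List String)) (cur : Option String),
      files.keys.Nodup →
      (∀ c, cur = some c → files.contains c = true) →
      (lines.foldl pdfAStep (files, cur)).1 =
        (match cur with
         | none => pdfGo files lines
         | some c => pdfGo (files.modify c [] (· ++ pdfBody lines))
                       (lines.drop (pdfBody lines).length)) := by
  induction lines with
  | nil =>
    intro files cur hn hcur
    match cur with
    | none => simp [pdfGo_nil]
    | some c =>
      simp only [List.foldl_nil]
      rw [show pdfBody ([] : List String) = [] from rfl]
      simp only [List.length_nil, List.drop_zero]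
      rw [modify_append_nil_of_contains files c (hcur c rfl) hn, pdfGo_nil]
  | cons h t ih =>
    intro files cur hn hcur
    by_cases hd : PySem.Str.startswith h "diff --git" = true
    · -- 'diff --git' line: A resets current; B skips it (it is a marker)
      have hp : PySem.Str.startswith h "+++ b/" = false := pdf_not_both h hd
      have hb : pdfBody (h :: t) = [] := by
        simp only [pdfBody, hp, hd, Bool.false_or, if_true]
      have lstep : pdfAStep (files, cur) h = (files, none) := by
        unfold pdfAStep; rw [hd]; simp
      have lhs : ((h :: t).foldl pdfAStep (files, cur)).1 = pdfGo files t := by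
        rw [List.foldl_cons, lstep, ih files none hn (by simp)]
      match cur with
      | none => rw [lhs, pdfGo_cons_neg files h t hp]
      | some c =>
        rw [lhs, hb]
        simp only [List.length_nil, List.drop_zero]
        rw [modify_append_nil_of_contains files c (hcur c rfl) hn,
          pdfGo_cons_neg files h t hp]
    · rw [Bool.not_eq_true] at hd
      by_cases hp : PySem.Str.startswith h "+++ b/" = true
      · -- header line
        have hb : pdfBody (h :: t) = [] := by
          simp only [pdfBody, hp, Bool.true_or, if_true]
        set cf := PySem.Str.slice h (some 6) none with hcf
        set files' := if files.contains cf then files else files.insert cf [] with hf'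
        have lstep : pdfAStep (files, cur) h = (files', some cf) := by
          unfold pdfAStep; rw [hd, hp]; simp [hf', hcf]
        have hn' : files'.keys.Nodup := by
          rw [hf']; split
          · exact hn
          · exact PySem.Dict.nodup_keys_insert files cf [] hn
        have hc' : files'.contains cf = true := by
          rw [hf']; split
          · assumption
          · exact PySem.Dict.contains_insert_self files cf []
        have lhs : ((h :: t).foldl pdfAStep (files, cur)).1 =
            pdfGo (files'.modify cf [] (· ++ pdfBody t)) (t.drop (pdfBody t).length) := by
          rw [List.foldl_cons, lstep,
            ih files' (some cf) hn' (by intro c hc; injection hc with hc; rw [← hc]; exact hc')]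
        have key : files'.modify cf [] (· ++ pdfBody t) = files.modify cf [] (· ++ pdfBody t) := by
          rw [hf']; split
          · rfl
          · next hnc =>
            rw [Bool.not_eq_true] at hnc
            simp [PySem.Dict.modify, PySem.Dict.getD_insert_self,
              PySem.Dict.insert_insert_self, getD_of_not_contains files cf [] hnc]
        match cur with
        | none => rw [lhs, key, pdfGo_cons_pos files h t hp]
        | some c =>
          rw [lhs, key, hb]
          simp only [List.length_nil, List.drop_zero]
          rw [modify_append_nil_of_contains files c (hcur c rfl) hn,
            pdfGo_cons_pos files h t hp]
      · -- ordinary line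
        rw [Bool.not_eq_true] at hp
        match cur with
        | none =>
          have lstep : pdfAStep (files, none) h = (files, none) := by
            unfold pdfAStep; rw [hd, hp]; simp
          rw [List.foldl_cons, lstep, ih files none hn (by simp),
            pdfGo_cons_neg files h t hp]
        | some c =>
          have lstep : pdfAStep (files, some c) h =
              (files.modify c [] (· ++ [h]), some c) := by
            unfold pdfAStep; rw [hd, hp]; simp
          have hbody : pdfBody (h :: t) = h :: pdfBody t := by
            simp only [pdfBody]; rw [hp, hd]; simp
          have hn1 : (files.modify c [] (· ++ [h])).keys.Nodup :=
            nodup_keys_modify files c [] _ hn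
          have hc1 : ∀ c', some c = some c' →
              (files.modify c [] (· ++ [h])).contains c' = true := by
            intro c' hc'; injection hc' with hc'; rw [← hc']
            exact contains_modify_self files c [] _
          rw [List.foldl_cons, lstep, ih _ (some c) hn1 hc1, hbody]
          simp only [List.length_cons, List.drop_succ_cons]
          rw [modify_modify_append, List.singleton_append]

-- ===== VERDICT (by name: the statement is the Claim_ definition above) =====
theorem parse_diff_files_py_spec : Claim_equal_parse_diff_files_py := by
  intro diff_text _
  unfold Spec_parse_diff_files_py parse_diff_files_py parse_diff_files_py_alt
  rw [pdf_main (PySem.Str.splitlines diff_text) PySem.Dict.empty none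
    (by simp [PySem.Dict.keys, PySem.Dict.empty]) (by simp)]
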